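-- pv_equiv track=rewrite | github.com/alclawrizmi/algorithmic-theology | experiments/2026-02-27_complexity_classes_belief_revision/main.py | switches
-- ===== SOURCE A (Python) =====
-- from typing import List, Tuple, Dict
--
-- def switches(seq: List[int]) -> int:
--     if not seq:
--         return 0
--     s = 0
--     prev = seq[0]
--     for x in seq[1:]:
--         if x != prev:
--             s += 1
--             prev = x
--     return s
-- ===== SOURCE B (Python) =====
-- def switches(seq):
--     # Count maximal runs of equal adjacent values by skipping each run,
--     # then subtract one (an empty sequence has no runs and no switches).
--     runs = 0
--     rest = seq
--     while rest:
--         head = rest[0]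
--         k = 1
--         while k < len(rest) and rest[k] == head:
--             k += 1
--         rest = rest[k:]
--         runs += 1
--     return runs - 1 if runs > 0 else 0
-- ===== Notes on version B (the rewrite author's own statement) =====
-- stated objective: alternative
-- what changed: B counts maximal runs of equal values by skipping each run and returns runs-1, instead of A's element-by-element comparison against a prev accumulator.
import Mathlib
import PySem

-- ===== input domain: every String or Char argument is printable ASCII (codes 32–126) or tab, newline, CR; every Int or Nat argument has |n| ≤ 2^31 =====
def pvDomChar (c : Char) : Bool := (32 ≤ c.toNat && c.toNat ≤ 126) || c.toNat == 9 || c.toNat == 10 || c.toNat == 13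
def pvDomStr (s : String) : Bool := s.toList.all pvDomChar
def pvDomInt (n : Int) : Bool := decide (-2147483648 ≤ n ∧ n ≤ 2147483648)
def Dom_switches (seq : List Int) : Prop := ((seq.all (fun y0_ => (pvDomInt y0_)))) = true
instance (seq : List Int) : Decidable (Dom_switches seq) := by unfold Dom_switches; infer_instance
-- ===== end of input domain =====

-- B counts maximal runs of equal adjacent values and returns runs - 1; same O(n) cost, different decomposition than A's prev-tracking scan.


-- ===== PORT A =====
-- literal port: fold over seq[1:] carrying (s, prev); the loop body is stepA
def stepA (st : Int × Int) (x : Int) : Int × Int :=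
  if x ≠ st.2 then (st.1 + 1, x) else st

def switches (seq : List Int) : Int :=
  match seq with
  | [] => 0
  | h :: t => (t.foldl stepA (0, h)).1

-- ===== PORT B =====
-- port of Source B's outer while loop: each step skips one maximal run (the inner while = dropWhile)
def switchesRuns : List Int → Int
  | [] => 0
  | h :: t => 1 + switchesRuns (t.dropWhile (· == h))
termination_by l => l.length
decreasing_by
  simp only [List.length_cons]
  exact Nat.lt_succ_of_le (List.length_dropWhile_le _ _)

def switches_alt (seq : List Int) : Int :=
  let runs := switchesRuns seq
  if runs > 0 then runs - 1 else 0

-- ===== PRECONDITION & SPEC =====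
def Spec_switches (seq : List Int) (out : Int) : Prop := out = switches_alt seq
instance (seq : List Int) (out : Int) : Decidable (Spec_switches seq out) := by unfold Spec_switches; infer_instance

-- ===== CLAIM (what is proved, stated in full; the proofs are below) =====
def Claim_equal_switches : Prop := ∀ (seq : List Int), Dom_switches seq → Spec_switches seq (switches seq)

-- ===== LEMMAS AND PROOFS =====
-- A's loop as structural recursion on the tail
def switchesAux (prev : Int) : List Int → Int
  | [] => 0
  | x :: xs => if x ≠ prev then 1 + switchesAux x xs else switchesAux prev xs

theorem foldl_eq_aux (t : List Int) (prev s : Int) :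
    (t.foldl stepA (s, prev)).1 = s + switchesAux prev t := by
  induction t generalizing prev s with
  | nil => simp [switchesAux]
  | cons x xs ih =>
    rw [List.foldl_cons]
    by_cases h : x = prev
    · rw [show stepA (s, prev) x = (s, prev) from by simp [stepA, h]]
      rw [ih, switchesAux]
      simp [h]
    · rw [show stepA (s, prev) x = (s + 1, x) from by simp [stepA, h]]
      rw [ih, switchesAux]
      simp [h]
      ring

theorem aux_eq_runs (t : List Int) (prev : Int) :
    switchesAux prev t = switchesRuns (prev :: t) - 1 := by
  induction t generalizing prev with
  | nil => simp [switchesAux, switchesRuns]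
  | cons x xs ih =>
    by_cases h : x = prev
    · have hd : ((x :: xs).dropWhile (· == prev)) = xs.dropWhile (· == prev) := by
        simp [List.dropWhile_cons, h]
      have e1 : switchesRuns (prev :: x :: xs)
          = 1 + switchesRuns (xs.dropWhile (· == prev)) := by
        rw [switchesRuns, hd]
      have e2 : switchesRuns (prev :: xs)
          = 1 + switchesRuns (xs.dropWhile (· == prev)) := by
        rw [switchesRuns]
      rw [switchesAux, if_neg (by simp [h]), ih prev, e1, e2]
    · have hd : ((x :: xs).dropWhile (· == prev)) = x :: xs := by
        simp [List.dropWhile_cons, h]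
      have e1 : switchesRuns (prev :: x :: xs) = 1 + switchesRuns (x :: xs) := by
        rw [switchesRuns, hd]
      rw [switchesAux, if_pos (by simp [h]), ih x, e1]
      ring

theorem runs_pos (h : Int) (t : List Int) : 0 < switchesRuns (h :: t) := by
  rw [switchesRuns]
  have : 0 ≤ switchesRuns (t.dropWhile (· == h)) := by
    generalize t.dropWhile (· == h) = u
    induction u using switchesRuns.induct with
    | case1 => simp [switchesRuns]
    | case2 a b ih => rw [switchesRuns]; omega
  omega

-- ===== VERDICT (by name: the statement is the Claim_ definition above) =====
theorem switches_spec : Claim_equal_switches := by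
  intro seq _
  unfold Spec_switches
  cases seq with
  | nil => simp [switches, switches_alt, switchesRuns]
  | cons h t =>
    rw [show switches (h :: t) = (t.foldl stepA (0, h)).1 from rfl]
    rw [show switches_alt (h :: t)
        = if switchesRuns (h :: t) > 0 then switchesRuns (h :: t) - 1 else 0 from rfl]
    rw [foldl_eq_aux, aux_eq_runs, if_pos (runs_pos h t)]
    ring
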